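-- pv_equiv track=rewrite | github.com/Minerstove/Python | cs11/Lab6/6d.py | longest_string_seq
-- ===== SOURCE A (Python) =====
-- def longest_string_seq(strings):
--     if not strings:
--         return 0
--
--     strings = list(set(strings))
--     strings = sorted(strings, key=len)
--     n = len(strings)
--     dp = [1] * n
--
--     for i in range(n):
--         for j in range(i):
--             if strings[j] in strings[i]:
--                 dp[i] = max(dp[i], dp[j] + 1)
--
--     return max(dp)
-- ===== SOURCE B (Python) =====
-- def longest_string_seq(strings):
--     if not strings:
--         return 0
--     items = list(set(strings))
--     cache = {}
--
--     def chain(s):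
--         if s not in cache:
--             cache[s] = max([chain(t) + 1 for t in items if t != s and t in s],
--                            default=1)
--         return cache[s]
--
--     return max(chain(s) for s in items)
-- ===== Notes on version B (the rewrite author's own statement) =====
-- stated objective: alternative
-- what changed: Replaces the length-sort plus nested-index dp-array loops with a memoized recursive chain-length function over the deduplicated strings (longest path in the substring DAG via DFS), dropping the sort entirely.
import Mathlib
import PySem

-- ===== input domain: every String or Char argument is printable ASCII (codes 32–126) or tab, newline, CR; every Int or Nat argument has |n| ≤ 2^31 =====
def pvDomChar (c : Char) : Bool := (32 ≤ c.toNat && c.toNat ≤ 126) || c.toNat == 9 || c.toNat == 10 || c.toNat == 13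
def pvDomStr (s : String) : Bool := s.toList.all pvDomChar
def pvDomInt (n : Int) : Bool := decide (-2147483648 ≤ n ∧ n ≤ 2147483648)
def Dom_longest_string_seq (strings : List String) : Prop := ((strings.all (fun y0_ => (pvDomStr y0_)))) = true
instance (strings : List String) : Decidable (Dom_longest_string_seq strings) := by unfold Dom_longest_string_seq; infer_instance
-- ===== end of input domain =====

-- B replaces A's length-sort + nested-index dp loops by a memoized recursive chain-length
-- function over the deduplicated strings (longest path in the substring DAG); same values, no sort.

-- ===== PORT A =====
-- body of A's inner loop: 'if strings[j] in strings[i]: dp[i] = max(dp[i], dp[j] + 1)'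
def pvInner (L : List String) (i : Int) (dp : List Int) (j : Int) : List Int :=
  if PySem.Str.isIn (PySem.List.pyGetD L j "") (PySem.List.pyGetD L i "") then
    PySem.List.pySetD dp i (max (PySem.List.pyGetD dp i 0) (PySem.List.pyGetD dp j 0 + 1))
  else dp

def longest_string_seq (strings : List String) : Int :=
  if strings = [] then 0
  else
    let L := PySem.List.sorted (PySem.Set.ofList strings) (fun t => PySem.Str.len t)
    let n : Int := (L.length : Int)
    let dp := (PySem.List.pyRange 0 n).foldl
        (fun dp i => (PySem.List.pyRange 0 i).foldl (pvInner L i) dp)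
        (List.replicate L.length (1 : Int))
    -- max(dp): dp is nonempty here, so Python's max never raises
    (PySem.List.max? dp (fun y => y)).getD 0

-- ===== PORT B =====
-- chain(s) of Source B, without the cache (the cache memoizes exactly these values and never
-- changes them).  'max([...], default=1)' is ported as 'foldl max 1': every list element is
-- pvChain + 1 ≥ 2 > 1, so the fold returns the list maximum when the list is nonempty and
-- the default 1 otherwise, exactly as Python.
def pvChain (items : List String) (s : String) : Int :=
  ((items.filter (fun t => t != s && PySem.Str.isIn t s)).attach.map
      (fun t => pvChain items t.1 + 1)).foldl max 1
termination_by s.toList.length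
decreasing_by
  obtain ⟨hmem, hcond⟩ := List.mem_filter.mp t.2
  obtain ⟨hne, hin⟩ := Bool.and_eq_true_iff.mp hcond
  have hinf := (PySem.Str.isIn_iff_infix _ _).mp hin
  have hle := hinf.length_le
  have hne' : t.1 ≠ s := by simpa using hne
  have : t.1.toList.length ≠ s.toList.length := by
    intro h
    exact hne' (String.toList_inj.mp (hinf.eq_of_length h))
  omega

def longest_string_seq_alt (strings : List String) : Int :=
  if strings = [] then 0
  else
    let items := PySem.Set.ofList strings
    -- max(chain(s) for s in items): items is nonempty here
    (PySem.List.max? (items.map (fun s => pvChain items s)) (fun y => y)).getD 0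

-- ===== PRECONDITION & SPEC =====
def Spec_longest_string_seq (strings : List String) (out : Int) : Prop := out = longest_string_seq_alt strings
instance (strings : List String) (out : Int) : Decidable (Spec_longest_string_seq strings out) := by unfold Spec_longest_string_seq; infer_instance

-- ===== CLAIM (what is proved, stated in full; the proofs are below) =====
def Claim_equal_longest_string_seq : Prop := ∀ (strings : List String), Dom_longest_string_seq strings → Spec_longest_string_seq strings (longest_string_seq strings)

-- ===== LEMMAS AND PROOFS =====

theorem pv_max_rcomm : ∀ (b : Int) (a c : Int), max (max b a) c = max (max b c) a := by
  intro b a c; omega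

-- pvChain with the attach removed
theorem pvChain_eq (items : List String) (s : String) :
    pvChain items s =
      ((items.filter (fun t => t != s && PySem.Str.isIn t s)).map
        (fun t => pvChain items t + 1)).foldl max 1 := by
  rw [pvChain]
  congr 1
  simp

-- getD-based foldl-max value of max?
theorem pv_maxD_perm (l1 l2 : List Int) (h : l1.Perm l2) :
    (PySem.List.max? l1 (fun y => y)).getD 0 = (PySem.List.max? l2 (fun y => y)).getD 0 := by
  rcases h1 : PySem.List.max? l1 (fun y => y) with _ | m1
  · have : l1 = [] := (PySem.List.max?_eq_none_iff _ _).mp h1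
    subst this
    have : l2 = [] := h.nil_eq.symm
    subst this
    rfl
  · rcases h2 : PySem.List.max? l2 (fun y => y) with _ | m2
    · have hl2 : l2 = [] := (PySem.List.max?_eq_none_iff _ _).mp h2
      subst hl2
      have hl1 : l1 = [] := List.perm_nil.mp h
      rw [hl1, (PySem.List.max?_eq_none_iff ([] : List Int) (fun y => y)).mpr rfl] at h1
      cases h1
    · have m1m := PySem.List.max?_mem h1
      have m2m := PySem.List.max?_mem h2
      have le1 : m1 ≤ m2 := PySem.List.max?_isMax h2 m1 (h.mem_iff.mp m1m)
      have le2 : m2 ≤ m1 := PySem.List.max?_isMax h1 m2 (h.mem_iff.mpr m2m)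
      simp [le_antisymm le1 le2]

-- the predecessors A's inner loop scans (strict prefixes, substring test) are, up to
-- permutation, exactly the strings B's recursion scans
theorem pv_perm_filter (L items : List String) (hperm : L.Perm items) (hnodup : L.Nodup)
    (hsorted : L.Pairwise (fun a b => PySem.Str.len a ≤ PySem.Str.len b))
    (i : Nat) (hi : i < L.length) :
    ((L.take i).filter (fun t => PySem.Str.isIn t L[i])).Perm
      (items.filter (fun t => t != L[i] && PySem.Str.isIn t L[i])) := by
  have hndI : items.Nodup := hperm.nodup_iff.mp hnodup
  have hnd1 : ((L.take i).filter (fun t => PySem.Str.isIn t L[i])).Nodup :=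
    ((List.take_sublist i L).nodup hnodup).filter _
  have hnd2 : (items.filter (fun t => t != L[i] && PySem.Str.isIn t L[i])).Nodup :=
    hndI.filter _
  rw [List.perm_ext_iff_of_nodup hnd1 hnd2]
  intro t
  simp only [List.mem_filter, List.mem_take_iff_getElem, Bool.and_eq_true, bne_iff_ne, ne_eq]
  constructor
  · rintro ⟨⟨j, hj, hjt⟩, hin⟩
    obtain ⟨hji, hjL⟩ := lt_min_iff.mp hj
    subst hjt
    refine ⟨hperm.subset (List.getElem_mem _), ⟨?_, hin⟩⟩
    intro heq
    have hji' : j = i := hnodup.getElem_inj_iff.mp heq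
    omega
  · rintro ⟨hmem, hne, hin⟩
    have htL : t ∈ L := hperm.mem_iff.mpr hmem
    obtain ⟨j, hjL, hjt⟩ := List.getElem_of_mem htL
    have hji : j < i := by
      by_contra hji
      push_neg at hji
      have hjne : j ≠ i := by
        intro h
        subst h
        exact hne hjt.symm
      have hij : i < j := by omega
      have hlen_le := (List.pairwise_iff_getElem.mp hsorted) i j hi hjL hij
      have hinf := (PySem.Str.isIn_iff_infix _ _).mp hin
      have h1 := hinf.length_le
      have hne2 : t.toList.length ≠ (L[i]).toList.length := by
        intro h
        exact hne (String.toList_inj.mp (hinf.eq_of_length h))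
      rw [PySem.Str.len_eq, PySem.Str.len_eq, hjt] at hlen_le
      omega
    exact ⟨⟨j, lt_min_iff.mpr ⟨hji, hjL⟩, hjt⟩, hin⟩

-- B's chain at L[i] equals the fold over A's scanned predecessors
theorem pv_chain_at (L items : List String) (hperm : L.Perm items) (hnodup : L.Nodup)
    (hsorted : L.Pairwise (fun a b => PySem.Str.len a ≤ PySem.Str.len b))
    (i : Nat) (hi : i < L.length) :
    pvChain items L[i] =
      (((L.take i).filter (fun t => PySem.Str.isIn t L[i])).map
        (fun t => pvChain items t + 1)).foldl max 1 := by
  rw [pvChain_eq]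
  have hp := (pv_perm_filter L items hperm hnodup hsorted i hi).map (fun t => pvChain items t + 1)
  exact (@List.Perm.foldl_eq _ _ max _ _ ⟨pv_max_rcomm⟩ hp 1).symm

-- A's inner loop, characterised
theorem pv_inner_loop (L items : List String) (i : Nat) (hi : i < L.length)
    (dp : List Int) (hlen : dp.length = L.length)
    (hdp : ∀ j : Nat, j < i → dp.getD j 0 = pvChain items (L.getD j ""))
    (m : Nat) (hm : m ≤ i) :
    (PySem.List.pyRange 0 (m : Int)).foldl (pvInner L (i : Int)) dp =
      PySem.List.pySetD dp (i : Int)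
        ((((L.take m).filter (fun t => PySem.Str.isIn t (L.getD i ""))).map
            (fun t => pvChain items t + 1)).foldl max (dp.getD i 0)) := by
  have hilen : i < dp.length := by omega
  induction m with
  | zero =>
      rw [Nat.cast_zero, PySem.List.pyRange_one_eq_nil le_rfl]
      simp only [List.foldl_nil, List.take_zero, List.filter_nil, List.map_nil]
      rw [PySem.List.pySetD_natCast, List.getD_eq_getElem dp 0 hilen, List.set_getElem_self]
  | succ m ih =>
      have hm' : m ≤ i := by omega
      have hmlen : m < L.length := by omega
      have hcast : ((m + 1 : Nat) : Int) = (m : Int) + 1 := by push_cast; ring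
      rw [hcast, PySem.List.pyRange_one_succ_right (Int.natCast_nonneg m), List.foldl_append,
        ih hm']
      simp only [List.foldl_cons, List.foldl_nil]
      unfold pvInner
      simp only [PySem.List.pySetD_natCast, PySem.List.pyGetD_natCast]
      set V := (((L.take m).filter (fun t => PySem.Str.isIn t (L.getD i ""))).map
            (fun t => pvChain items t + 1)).foldl max (dp.getD i 0) with hV
      have hset_len : i < (dp.set i V).length := by rw [List.length_set]; omega
      have hgetV : (dp.set i V).getD i 0 = V := by
        rw [List.getD_eq_getElem _ 0 hset_len, List.getElem_set_self]
      have hgetm : (dp.set i V).getD m 0 = pvChain items (L.getD m "") := by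
        have hmne : i ≠ m := by omega
        have hmlt : m < (dp.set i V).length := by rw [List.length_set]; omega
        rw [List.getD_eq_getElem _ 0 hmlt, List.getElem_set_ne hmne,
          ← List.getD_eq_getElem dp 0 (show m < dp.length by omega)]
        exact hdp m (by omega)
      have htake : L.take (m + 1) = L.take m ++ [L.getD m ""] := by
        rw [List.take_succ, List.getElem?_eq_getElem hmlen, List.getD_eq_getElem L "" hmlen]
        rfl
      rw [hgetV, hgetm, htake]
      simp only [List.filter_append, List.map_append, List.foldl_append]
      by_cases hcond : PySem.Str.isIn (L.getD m "") (L.getD i "") = true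
      · have hfil : List.filter (fun t => PySem.Str.isIn t (L.getD i "")) [L.getD m ""] =
            [L.getD m ""] := by
          rw [List.filter_cons, if_pos hcond, List.filter_nil]
        rw [if_pos hcond, List.set_set, hfil]
        simp only [List.map_cons, List.map_nil, List.foldl_cons, List.foldl_nil, hV]
      · have hfil : List.filter (fun t => PySem.Str.isIn t (L.getD i "")) [L.getD m ""] =
            [] := by
          rw [List.filter_cons, if_neg hcond, List.filter_nil]
        rw [if_neg hcond, hfil]
        simp only [List.map_nil, List.foldl_nil, hV]

-- A's outer loop, characterised
theorem pv_outer_loop (L items : List String) (hperm : L.Perm items) (hnodup : L.Nodup)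
    (hsorted : L.Pairwise (fun a b => PySem.Str.len a ≤ PySem.Str.len b))
    (m : Nat) (hm : m ≤ L.length) :
    (PySem.List.pyRange 0 (m : Int)).foldl
        (fun dp i => (PySem.List.pyRange 0 i).foldl (pvInner L i) dp)
        (List.replicate L.length (1 : Int)) =
      (L.take m).map (pvChain items) ++ List.replicate (L.length - m) (1 : Int) := by
  induction m with
  | zero =>
      simp [PySem.List.pyRange_one_eq_nil (le_refl (0 : Int))]
  | succ m ih =>
      have hm' : m ≤ L.length := by omega
      have hmlen : m < L.length := by omega
      have hcast : ((m + 1 : Nat) : Int) = (m : Int) + 1 := by push_cast; ring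
      rw [hcast, PySem.List.pyRange_one_succ_right (Int.natCast_nonneg m), List.foldl_append,
        ih hm']
      simp only [List.foldl_cons, List.foldl_nil]
      set dpm := (L.take m).map (pvChain items) ++ List.replicate (L.length - m) (1 : Int)
        with hdpm
      have hlen1 : ((L.take m).map (pvChain items)).length = m := by
        simp [List.length_take, Nat.min_eq_left hm']
      have hlen : dpm.length = L.length := by
        rw [hdpm]
        simp only [List.length_append, List.length_replicate, hlen1]
        omega
      have hdp : ∀ j : Nat, j < m → dpm.getD j 0 = pvChain items (L.getD j "") := by
        intro j hj
        rw [hdpm, List.getD_append _ _ _ j (by omega)]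
        have hj2 : j < ((L.take m).map (pvChain items)).length := by omega
        rw [List.getD_eq_getElem _ 0 hj2, List.getElem_map, List.getElem_take,
          List.getD_eq_getElem L "" (show j < L.length by omega)]
      rw [pv_inner_loop L items m hmlen dpm hlen hdp m le_rfl]
      have hrep : L.length - m = (L.length - (m + 1)) + 1 := by omega
      have hgm : dpm.getD m 0 = 1 := by
        rw [hdpm, List.getD_append_right _ _ _ m (by omega), hlen1, Nat.sub_self, hrep,
          List.replicate_succ]
        rfl
      rw [hgm]
      have hLm : L.getD m "" = L[m] := List.getD_eq_getElem L "" hmlen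
      rw [hLm, ← pv_chain_at L items hperm hnodup hsorted m hmlen]
      rw [PySem.List.pySetD_natCast, hdpm, List.set_append_right _ _ (by omega), hlen1,
        Nat.sub_self, hrep, List.replicate_succ, List.set_cons_zero]
      have htake : L.take (m + 1) = L.take m ++ [L[m]] := by
        rw [List.take_succ, List.getElem?_eq_getElem hmlen]
        rfl
      rw [htake, List.map_append, List.append_assoc]
      rfl

-- ===== VERDICT (by name: the statement is the Claim_ definition above) =====
theorem longest_string_seq_spec : Claim_equal_longest_string_seq := by
  intro strings _
  unfold Spec_longest_string_seq
  by_cases hnil : strings = []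
  · simp [hnil, longest_string_seq, longest_string_seq_alt]
  · simp only [longest_string_seq, longest_string_seq_alt, if_neg hnil]
    set items : List String := PySem.Set.ofList strings with hitems
    set L := PySem.List.sorted items (fun t => PySem.Str.len t) with hL
    have hperm : L.Perm items := PySem.List.sorted_perm items _ _
    have hnodup : L.Nodup := hperm.nodup_iff.mpr (PySem.Set.nodup_ofList strings)
    have hsorted : L.Pairwise (fun a b => PySem.Str.len a ≤ PySem.Str.len b) :=
      PySem.List.sorted_pairwise items _
    have hdp := pv_outer_loop L items hperm hnodup hsorted L.length le_rfl
    simp only [List.take_length, Nat.sub_self, List.replicate_zero, List.append_nil] at hdp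
    rw [hdp]
    exact pv_maxD_perm _ _ (hperm.map (pvChain items))
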